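-- pv_equiv track=rewrite | github.com/shoaibrayeen/Competitive-Coding | TechGig/Elections/code.py | solve
-- ===== SOURCE A (Python) =====
-- def solve(row,col):
--     for i in range(0,len(row)):
--         col.sort(reverse = True)
--         temp = row[i]
--         if temp > len(col):
--             return False
--         if temp != 0:
--             for j in range(0,temp):
--                 col[j] = col[j] - 1
--
--     for i in range(0,len(col)):
--         if col[i] != 0:
--             return False
--
--     return True
-- ===== SOURCE B (Python) =====
-- def solve(row, col):
--     # Return-value equivalent to A; does not mutate col (A sorts/decrements col in place).
--     # Keeps a descending-sorted working list and restores order after each step by a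
--     # linear merge instead of re-sorting the whole list every iteration.
--     def merge(xs, ys):
--         out = []
--         i = j = 0
--         while i < len(xs) and j < len(ys):
--             if xs[i] >= ys[j]:
--                 out.append(xs[i]); i += 1
--             else:
--                 out.append(ys[j]); j += 1
--         out.extend(xs[i:])
--         out.extend(ys[j:])
--         return out
--
--     cur = sorted(col, reverse=True)
--     for t in row:
--         if t > len(cur):
--             return False
--         k = t if t > 0 else 0
--         cur = merge([x - 1 for x in cur[:k]], cur[k:])
--     return all(x == 0 for x in cur)
-- ===== Notes on version B (the rewrite author's own statement) =====
-- stated objective: alternative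
-- what changed: B sorts col once and keeps the working list in descending order by a linear merge of the decremented prefix with the untouched suffix, instead of A's full re-sort of col on every row iteration; B also does not mutate col (A sorts and decrements it in place).
import Mathlib
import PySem

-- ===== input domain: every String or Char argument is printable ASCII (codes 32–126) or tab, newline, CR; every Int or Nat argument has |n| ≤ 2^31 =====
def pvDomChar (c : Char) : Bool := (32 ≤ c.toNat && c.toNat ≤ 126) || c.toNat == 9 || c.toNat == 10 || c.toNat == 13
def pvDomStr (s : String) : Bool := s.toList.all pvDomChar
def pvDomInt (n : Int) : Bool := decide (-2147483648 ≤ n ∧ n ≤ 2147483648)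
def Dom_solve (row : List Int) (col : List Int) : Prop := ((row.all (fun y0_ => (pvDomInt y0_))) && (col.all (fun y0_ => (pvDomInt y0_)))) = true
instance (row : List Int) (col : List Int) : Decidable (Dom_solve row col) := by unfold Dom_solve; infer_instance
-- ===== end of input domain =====

-- B sorts col once and restores descending order by a linear merge each step instead of
-- A's per-iteration full re-sort (alternative structure, not measured faster); equivalence
-- is about the RETURN value only: A sorts/decrements col in place, B does not mutate it.


-- ===== PORT A =====
-- inner loop: for j in range(0,temp): col[j] = col[j] - 1
def decLoop : Int → List Int → List Int
  | _, [] => []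
  | t, x :: xs => if 0 < t then (x - 1) :: decLoop (t - 1) xs else x :: xs

-- outer loop over row; none = early 'return False'
def solveLoopA : List Int → List Int → Option (List Int)
  | [], col => some col
  | t :: rs, col =>
    let col' := PySem.List.sorted col (fun x => x) true   -- col.sort(reverse=True)
    if t > (col'.length : Int) then none
    else solveLoopA rs (decLoop t col')

-- final loop: for i in range(0,len(col)): if col[i] != 0: return False
def allZeroA : List Int → Bool
  | [] => true
  | x :: xs => if x ≠ 0 then false else allZeroA xs

def solve (row : List Int) (col : List Int) : Bool :=
  match solveLoopA row col with
  | none => false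
  | some c => allZeroA c

-- ===== PORT B =====
-- linear merge of two descending lists (Source B's merge)
def mergeDesc : List Int → List Int → List Int
  | [], ys => ys
  | x :: xs, [] => x :: xs
  | x :: xs, y :: ys =>
    if x ≥ y then x :: mergeDesc xs (y :: ys) else y :: mergeDesc (x :: xs) ys
termination_by xs ys => xs.length + ys.length

def solveLoopB : List Int → List Int → Option (List Int)
  | [], cur => some cur
  | t :: rs, cur =>
    if t > (cur.length : Int) then none
    else
      let k : Nat := if 0 < t then t.toNat else 0
      solveLoopB rs (mergeDesc ((cur.take k).map (fun x => x - 1)) (cur.drop k))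

def solve_alt (row : List Int) (col : List Int) : Bool :=
  match solveLoopB row (PySem.List.sorted col (fun x => x) true) with
  | none => false
  | some c => c.all (fun x => x == 0)

-- ===== PRECONDITION & SPEC =====
def Spec_solve (row : List Int) (col : List Int) (out : Bool) : Prop := out = solve_alt row col
instance (row : List Int) (col : List Int) (out : Bool) : Decidable (Spec_solve row col out) := by unfold Spec_solve; infer_instance

-- ===== CLAIM (what is proved, stated in full; the proofs are below) =====
def Claim_equal_solve : Prop := ∀ (row : List Int) (col : List Int), Dom_solve row col → Spec_solve row col (solve row col)

-- ===== LEMMAS AND PROOFS =====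

-- descending order
def DescP (l : List Int) : Prop := l.Pairwise (fun a b => b ≤ a)

theorem mergeDesc_perm : ∀ (xs ys : List Int), (mergeDesc xs ys).Perm (xs ++ ys) := by
  intro xs ys
  fun_induction mergeDesc xs ys with
  | case1 ys => simp
  | case2 x xs => simp
  | case3 x xs y ys h ih =>
    simpa using ih.cons x
  | case4 x xs y ys h ih =>
    exact (ih.cons y).trans List.perm_middle.symm

theorem mem_mergeDesc {z : Int} {xs ys : List Int} :
    z ∈ mergeDesc xs ys ↔ z ∈ xs ∨ z ∈ ys := by
  rw [(mergeDesc_perm xs ys).mem_iff]; simp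

theorem mergeDesc_desc : ∀ (xs ys : List Int), DescP xs → DescP ys → DescP (mergeDesc xs ys) := by
  intro xs ys hx hy
  unfold DescP at hx hy ⊢
  fun_induction mergeDesc xs ys with
  | case1 ys => exact hy
  | case2 x xs => exact hx
  | case3 x xs y ys h ih =>
    rw [List.pairwise_cons] at hx
    refine List.pairwise_cons.mpr ⟨?_, ih hx.2 hy⟩
    intro z hz
    rcases mem_mergeDesc.mp hz with h1 | h1
    · exact hx.1 z h1
    · rw [List.pairwise_cons] at hy
      rcases List.mem_cons.mp h1 with rfl | h1
      · omega
      · have := hy.1 z h1; omega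
  | case4 x xs y ys h ih =>
    rw [List.pairwise_cons] at hy
    refine List.pairwise_cons.mpr ⟨?_, ih hx hy.2⟩
    intro z hz
    rcases mem_mergeDesc.mp hz with h1 | h1
    · rw [List.pairwise_cons] at hx
      rcases List.mem_cons.mp h1 with rfl | h1
      · omega
      · have := hx.1 z h1; omega
    · exact hy.1 z h1

-- A's inner decrement loop is: decrement the first k entries, keep the rest
theorem decLoop_eq (t : Int) (l : List Int) :
    decLoop t l = (l.take (if 0 < t then t.toNat else 0)).map (fun x => x - 1)
      ++ l.drop (if 0 < t then t.toNat else 0) := by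
  induction l generalizing t with
  | nil => simp [decLoop]
  | cons x xs ih =>
    by_cases h : 0 < t
    · have hk2 : (if 0 < t - 1 then (t - 1).toNat else 0) = t.toNat - 1 := by
        split_ifs
        all_goals omega
      have ht : (if 0 < t then t.toNat else 0) = (t.toNat - 1) + 1 := by
        split_ifs
        all_goals omega
      rw [decLoop, if_pos h, ih (t - 1), hk2, ht]
      simp
    · simp [decLoop, h]

-- two descending lists that are permutations of each other are equal
theorem desc_perm_eq {l₁ l₂ : List Int} (hp : l₁.Perm l₂) (h₁ : DescP l₁) (h₂ : DescP l₂) :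
    l₁ = l₂ := by
  exact List.Perm.eq_of_pairwise (le := fun a b : Int => b ≤ a)
    (fun a b _ _ hab hba => by omega) h₁ h₂ hp

theorem sorted_rev_eq_of_desc_perm {colA colB : List Int}
    (hp : colB.Perm colA) (hd : DescP colB) :
    PySem.List.sorted colA (fun x => x) true = colB := by
  refine desc_perm_eq ?_ ?_ hd
  · exact (PySem.List.sorted_perm ..).trans hp.symm
  · exact PySem.List.sorted_pairwise_rev ..

theorem descP_take {l : List Int} (k : Nat) (h : DescP l) : DescP (l.take k) :=
  h.sublist (List.take_sublist _ _)

theorem descP_drop {l : List Int} (k : Nat) (h : DescP l) : DescP (l.drop k) :=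
  h.sublist (List.drop_sublist _ _)

theorem descP_map_sub {l : List Int} (h : DescP l) : DescP (l.map (fun x => x - 1)) := by
  refine List.Pairwise.map _ ?_ h
  intro a b hab; omega

-- main loop invariant
theorem loop_rel : ∀ (rs colA colB : List Int), colB.Perm colA → DescP colB →
    (solveLoopA rs colA = none ∧ solveLoopB rs colB = none) ∨
    (∃ a b, solveLoopA rs colA = some a ∧ solveLoopB rs colB = some b ∧ b.Perm a ∧ DescP b) := by
  intro rs
  induction rs with
  | nil =>
    intro colA colB hp hd
    exact Or.inr ⟨colA, colB, rfl, rfl, hp, hd⟩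
  | cons t rs ih =>
    intro colA colB hp hd
    have hs : PySem.List.sorted colA (fun x => x) true = colB :=
      sorted_rev_eq_of_desc_perm hp hd
    by_cases hg : t > (colB.length : Int)
    · left
      constructor
      · rw [solveLoopA, hs, if_pos hg]
      · rw [solveLoopB, if_pos hg]
    · have hstepA : solveLoopA (t :: rs) colA = solveLoopA rs (decLoop t colB) := by
        rw [solveLoopA, hs, if_neg hg]
      set k : Nat := if 0 < t then t.toNat else 0 with hk
      have hstepB : solveLoopB (t :: rs) colB
          = solveLoopB rs (mergeDesc ((colB.take k).map (fun x => x - 1)) (colB.drop k)) := by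
        rw [solveLoopB, if_neg hg]
      have hdec : decLoop t colB = (colB.take k).map (fun x => x - 1) ++ colB.drop k :=
        decLoop_eq t colB
      have hperm' : (mergeDesc ((colB.take k).map (fun x => x - 1)) (colB.drop k)).Perm
          (decLoop t colB) := by
        rw [hdec]; exact mergeDesc_perm _ _
      have hdesc' : DescP (mergeDesc ((colB.take k).map (fun x => x - 1)) (colB.drop k)) :=
        mergeDesc_desc _ _ (descP_map_sub (descP_take k hd)) (descP_drop k hd)
      rw [hstepA, hstepB]
      exact ih (decLoop t colB) _ hperm' hdesc'

theorem allZeroA_eq (l : List Int) : allZeroA l = l.all (fun x => x == 0) := by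
  induction l with
  | nil => rfl
  | cons x xs ih =>
    by_cases h : x = 0 <;> simp [allZeroA, h, ih]

-- ===== VERDICT (by name: the statement is the Claim_ definition above) =====
theorem solve_spec : Claim_equal_solve := by
  intro row col _
  show solve row col = solve_alt row col
  unfold solve solve_alt
  rcases loop_rel row col (PySem.List.sorted col (fun x => x) true)
      (PySem.List.sorted_perm ..) (PySem.List.sorted_pairwise_rev ..) with
    ⟨h1, h2⟩ | ⟨a, b, h1, h2, hp, _⟩
  · rw [h1, h2]
  · rw [h1, h2]
    show allZeroA a = b.all (fun x => x == 0)
    rw [allZeroA_eq]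
    exact hp.symm.all_eq
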